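-- pv_equiv track=rewrite | github.com/hsouvan/INST-326-102 | spoons.py | cpu_discard
-- ===== SOURCE A (Python) =====
-- def cpu_discard(cpu, next_player, cpu_hand, next_player_pile):
--     """
--     Allows the computer to decide what card to discard in Spoons.
--
--     Parameters:
--         cpu (str): Name of the computer player
--         next_player (str): Name of the next player
--         cpu_hand (list of str): The computer's current hand
--         next_player_pile (list of str): The next players trash pile
--
--     Returns:
--         str or None: The card that was discarded, or None
--
--     Side Effects:
--         Removes the discarded card from cpu_hand
--         Adds the discarded card to the next_player_pile
--     """
--     for i in range(len(cpu_hand)):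
--         for j in range(i + 1, len(cpu_hand)):
--             if cpu_hand[i][:-1] == cpu_hand[j][:-1]:
--                 for card in cpu_hand:
--                     if card[:-1] != cpu_hand[i][:-1]:
--                         cpu_hand.remove(card)
--                         next_player_pile.append(card)
--                         return card
--     return None
-- ===== SOURCE B (Python) =====
-- def cpu_discard(cpu, next_player, cpu_hand, next_player_pile):
--     """Frequency-map reimplementation: one counting pass, then two linear scans
--     (no nested index loops).  Same side effects as the original: removes the
--     discarded card from cpu_hand and appends it to next_player_pile."""
--     counts = {}
--     for card in cpu_hand:
--         r = card[:-1]
--         counts[r] = counts.get(r, 0) + 1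
--     dup_rank = None
--     for card in cpu_hand:
--         if counts[card[:-1]] >= 2:
--             dup_rank = card[:-1]
--             break
--     if dup_rank is None:
--         return None
--     for card in cpu_hand:
--         if card[:-1] != dup_rank:
--             cpu_hand.remove(card)
--             next_player_pile.append(card)
--             return card
--     return None
-- ===== Notes on version B (the rewrite author's own statement) =====
-- stated objective: faster
-- what changed: Replaces the O(n^3) nested index loops (all pairs i<j, then a rescan) by one frequency-map pass over ranks followed by two linear scans: first card whose rank occurs >= 2 times gives the duplicate rank, then the first card of a different rank is discarded.
import Mathlib
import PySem

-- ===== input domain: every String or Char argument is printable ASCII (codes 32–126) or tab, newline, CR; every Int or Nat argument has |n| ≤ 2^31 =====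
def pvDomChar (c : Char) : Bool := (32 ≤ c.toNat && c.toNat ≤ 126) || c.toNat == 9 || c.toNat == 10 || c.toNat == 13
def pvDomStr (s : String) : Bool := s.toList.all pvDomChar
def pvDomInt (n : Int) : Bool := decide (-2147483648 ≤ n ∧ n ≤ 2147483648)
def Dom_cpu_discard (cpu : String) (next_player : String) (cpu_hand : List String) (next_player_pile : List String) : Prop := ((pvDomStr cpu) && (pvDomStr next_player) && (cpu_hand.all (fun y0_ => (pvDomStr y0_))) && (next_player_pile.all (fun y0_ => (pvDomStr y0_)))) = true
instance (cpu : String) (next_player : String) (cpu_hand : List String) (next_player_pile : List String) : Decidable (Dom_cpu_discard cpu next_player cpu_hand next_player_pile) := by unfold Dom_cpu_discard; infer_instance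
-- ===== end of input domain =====

-- B replaces A's O(n^3) nested pair-of-indices search by one rank-frequency map plus two linear
-- scans (simpler); equivalence proved for the RETURN value — both Pythons also remove the returned
-- card from cpu_hand and append it to next_player_pile (identical side effects, not modelled here).

-- card[:-1]: the rank of a card (used by both Pythons)
def pvRank (c : String) : String := PySem.Str.slice c none (some (-1))

-- ===== PORT A =====
-- indices produced by range(...) are always in range, so the default "" of pyGetD is never used (exact)
def cpu_discard (cpu : String) (next_player : String) (cpu_hand : List String) (next_player_pile : List String) : Option String :=
  (PySem.List.pyRange 0 (cpu_hand.length : Int) 1).findSome? (fun i =>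
    (PySem.List.pyRange (i + 1) (cpu_hand.length : Int) 1).findSome? (fun j =>
      if pvRank (PySem.List.pyGetD cpu_hand i "") = pvRank (PySem.List.pyGetD cpu_hand j "") then
        cpu_hand.findSome? (fun card =>
          if pvRank card ≠ pvRank (PySem.List.pyGetD cpu_hand i "") then some card else none)
      else none))

-- ===== PORT B =====
def cpu_discard_alt (cpu : String) (next_player : String) (cpu_hand : List String) (next_player_pile : List String) : Option String :=
  let counts : PySem.Dict String Int := cpu_hand.foldl (fun d card => d.modify (pvRank card) 0 (· + 1)) (PySem.Dict.empty)
  match cpu_hand.find? (fun card => decide (2 ≤ counts.getD (pvRank card) 0)) with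
  | some dup =>
      cpu_hand.findSome? (fun card => if pvRank card ≠ pvRank dup then some card else none)
  | none => none

-- ===== PRECONDITION & SPEC =====
def Spec_cpu_discard (cpu : String) (next_player : String) (cpu_hand : List String) (next_player_pile : List String) (out : Option String) : Prop := out = cpu_discard_alt cpu next_player cpu_hand next_player_pile
instance (cpu : String) (next_player : String) (cpu_hand : List String) (next_player_pile : List String) (out : Option String) : Decidable (Spec_cpu_discard cpu next_player cpu_hand next_player_pile out) := by unfold Spec_cpu_discard; infer_instance

-- ===== CLAIM (what is proved, stated in full; the proofs are below) =====
def Claim_equal_cpu_discard : Prop := ∀ (cpu : String) (next_player : String) (cpu_hand : List String) (next_player_pile : List String), Dom_cpu_discard cpu next_player cpu_hand next_player_pile → Spec_cpu_discard cpu next_player cpu_hand next_player_pile (cpu_discard cpu next_player cpu_hand next_player_pile)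

-- ===== LEMMAS AND PROOFS =====

-- the inner "for card in cpu_hand: …" loop of both Pythons
def pvScan (full : List String) (r : String) : Option String :=
  full.findSome? (fun card => if pvRank card ≠ r then some card else none)

-- list-level reading of A's two outer index loops (after collapsing the j-loop)
def pvGoA (full : List String) : List String → Option String
  | [] => none
  | c :: rest =>
      match (if pvRank c ∈ rest.map pvRank then pvScan full (pvRank c) else none) with
      | some b => some b
      | none => pvGoA full rest

-- list-level reading of B: first card whose rank is duplicated in full, then scan
def pvGoB (full : List String) (l : List String) : Option String :=
  match l.find? (fun c => decide (2 ≤ (full.map pvRank).count (pvRank c))) with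
  | some dup => pvScan full (pvRank dup)
  | none => none

lemma findSome?_ite_const {α β : Type} (p : α → Prop) [DecidablePred p] (x : Option β) :
    ∀ l : List α, l.findSome? (fun a => if p a then x else none)
      = if ∃ a ∈ l, p a then x else none := by
  intro l
  induction l with
  | nil => simp
  | cons a t ih =>
      by_cases h : p a
      · cases x with
        | none => simp [h]
        | some v => simp [h]
      · simp [h, ih]

lemma scan_none {full : List String} {r : String} (h : pvScan full r = none) :
    ∀ x ∈ full, pvRank x = r := by
  intro x hx
  have := (List.findSome?_eq_none_iff).1 h x hx
  by_contra hne
  simp [hne] at this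

lemma goA_none {full : List String} {r : String} (hscan : pvScan full r = none) :
    ∀ l : List String, (∀ x ∈ l, pvRank x = r) → pvGoA full l = none := by
  intro l
  induction l with
  | nil => intro _; simp [pvGoA]
  | cons c rest ih =>
      intro hall
      have hc : pvRank c = r := hall c (by simp)
      have htail := ih (fun x hx => hall x (by simp [hx]))
      unfold pvGoA
      rw [hc]
      by_cases hm : r ∈ rest.map pvRank <;> simp [hm, hscan, htail]

-- A's outer i-loop, peeled from index k, equals pvGoA on the corresponding suffix
lemma outerA (full : List String) :
    ∀ (l : List String) (k : Nat), full.drop k = l →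
      (PySem.List.pyRange (k : Int) (full.length : Int) 1).findSome? (fun i =>
        (PySem.List.pyRange (i + 1) (full.length : Int) 1).findSome? (fun j =>
          if pvRank (PySem.List.pyGetD full i "") = pvRank (PySem.List.pyGetD full j "") then
            pvScan full (pvRank (PySem.List.pyGetD full i ""))
          else none))
      = pvGoA full l := by
  intro l
  induction l with
  | nil =>
      intro k hk
      have hlen : full.length ≤ k := by
        by_contra h
        have : full.drop k ≠ [] := by
          apply List.ne_nil_of_length_pos
          simp [List.length_drop]; omega
        exact this hk
      rw [PySem.List.pyRange_one_eq_nil (by exact_mod_cast hlen)]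
      simp [pvGoA]
  | cons c rest ih =>
      intro k hk
      have hklt : k < full.length := by
        by_contra h
        rw [List.drop_eq_nil_of_le (by omega)] at hk
        exact (List.cons_ne_nil c rest) hk.symm
      have hgetk : full[k]? = some c := by
        have h0 : (List.drop k full)[0]? = full[k + 0]? := List.getElem?_drop
        rw [hk] at h0; simpa using h0.symm
      have hgetDk : PySem.List.pyGetD full (k : Int) "" = c := by
        rw [PySem.List.pyGetD_natCast]
        simp [List.getD, hgetk]
      have hdrop1 : full.drop (k + 1) = rest := by
        have : full.drop (k + 1) = (full.drop k).drop 1 := by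
          rw [List.drop_drop]
        rw [this, hk]; rfl
      rw [PySem.List.pyRange_one_cons (by exact_mod_cast hklt)]
      rw [List.findSome?_cons]
      have hcast : (k : Int) + 1 = ((k + 1 : Nat) : Int) := by push_cast; ring
      -- the inner j-loop at i = k
      have hmap : (PySem.List.pyRange ((k : Int) + 1) (full.length : Int) 1).map
          (fun j => PySem.List.pyGetD full j "") = rest := by
        rw [hcast, PySem.List.map_pyGetD_pyRange' full "" (by positivity)]
        simpa using hdrop1
      have hinner : (PySem.List.pyRange ((k : Int) + 1) (full.length : Int) 1).findSome?
            (fun j => if pvRank (PySem.List.pyGetD full (k : Int) "")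
                        = pvRank (PySem.List.pyGetD full j "") then
                        pvScan full (pvRank (PySem.List.pyGetD full (k : Int) "")) else none)
          = (if pvRank c ∈ rest.map pvRank then pvScan full (pvRank c) else none) := by
        rw [hgetDk]
        rw [findSome?_ite_const (fun j => pvRank c = pvRank (PySem.List.pyGetD full j ""))]
        congr 1
        rw [← hmap]
        simp only [List.mem_map, eq_iff_iff]
        constructor
        · rintro ⟨j, hj, hpj⟩
          exact ⟨PySem.List.pyGetD full j "", ⟨j, hj, rfl⟩, hpj.symm⟩
        · rintro ⟨y, ⟨j, hj, hyj⟩, hy⟩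
          exact ⟨j, hj, by rw [hyj, hy]⟩
      rw [hinner]
      have htail := ih (k + 1) hdrop1
      push_cast at htail
      unfold pvGoA
      cases hsc : (if pvRank c ∈ rest.map pvRank then pvScan full (pvRank c) else none) with
      | some b => rfl
      | none => simpa using htail

-- the heart: A's pair search and B's frequency test pick the same rank (or both give none)
lemma main_eq (full : List String) :
    ∀ (l pre : List String), pre ++ l = full →
      (∀ c ∈ pre, (full.map pvRank).count (pvRank c) ≤ 1) →
      pvGoA full l = pvGoB full l := by
  intro l
  induction l with
  | nil => intro pre _ _; simp [pvGoA, pvGoB]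
  | cons c rest ih =>
      intro pre hfull hinv
      have hsplit : full.map pvRank = pre.map pvRank ++ pvRank c :: rest.map pvRank := by
        rw [← hfull]; simp
      have hnotpre : pvRank c ∉ pre.map pvRank := by
        intro hmem
        obtain ⟨c', hc', hrc'⟩ := List.mem_map.1 hmem
        have hle := hinv c' hc'
        rw [hrc'] at hle
        have h1 : 1 ≤ (pre.map pvRank).count (pvRank c) := List.count_pos_iff.2 hmem
        rw [hsplit, List.count_append, List.count_cons_self] at hle
        omega
      have hcount : (full.map pvRank).count (pvRank c)
          = (rest.map pvRank).count (pvRank c) + 1 := by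
        rw [hsplit, List.count_append, List.count_cons_self,
            List.count_eq_zero.2 hnotpre]
        omega
      have hmemiff : pvRank c ∈ rest.map pvRank ↔ 2 ≤ (full.map pvRank).count (pvRank c) := by
        rw [hcount]
        constructor
        · intro h; have := List.count_pos_iff.2 h; omega
        · intro h
          exact List.count_pos_iff.1 (by omega)
      by_cases hm : pvRank c ∈ rest.map pvRank
      · have hfind : (c :: rest).find? (fun x => decide (2 ≤ (full.map pvRank).count (pvRank x)))
            = some c := by
          rw [List.find?_cons_of_pos]
          simpa using hmemiff.1 hm
        unfold pvGoA pvGoB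
        rw [hfind]
        cases hsc : pvScan full (pvRank c) with
        | some b => simp [hm, hsc]
        | none =>
            simp only [hm, if_true, hsc]
            have hrestfull : ∀ x ∈ rest, x ∈ full := by
              intro x hx; rw [← hfull]; simp [hx]
            have hall : ∀ x ∈ rest, pvRank x = pvRank c := fun x hx =>
              scan_none hsc x (hrestfull x hx)
            exact goA_none hsc rest hall
      · have hc1 : (full.map pvRank).count (pvRank c) ≤ 1 := by
          rw [hcount, List.count_eq_zero.2 hm]
        have hfind : (c :: rest).find? (fun x => decide (2 ≤ (full.map pvRank).count (pvRank x)))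
            = rest.find? (fun x => decide (2 ≤ (full.map pvRank).count (pvRank x))) := by
          rw [List.find?_cons_of_neg]
          simp; omega
        have hinv' : ∀ c' ∈ pre ++ [c], (full.map pvRank).count (pvRank c') ≤ 1 := by
          intro c' hc'
          rcases List.mem_append.1 hc' with h | h
          · exact hinv c' h
          · simp at h; subst h; exact hc1
        have := ih (pre ++ [c]) (by rw [← hfull]; simp) hinv'
        unfold pvGoA pvGoB
        rw [hfind]
        simpa [hm, pvGoB] using this

lemma portA_eq (cpu next_player : String) (cpu_hand next_player_pile : List String) :
    cpu_discard cpu next_player cpu_hand next_player_pile = pvGoA cpu_hand cpu_hand := by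
  have h := outerA cpu_hand cpu_hand 0 (by simp)
  unfold cpu_discard
  exact_mod_cast h

lemma portB_eq (cpu next_player : String) (cpu_hand next_player_pile : List String) :
    cpu_discard_alt cpu next_player cpu_hand next_player_pile = pvGoB cpu_hand cpu_hand := by
  have hcounter : cpu_hand.foldl (fun d card => d.modify (pvRank card) 0 (· + 1)) PySem.Dict.empty
      = PySem.Dict.counter (cpu_hand.map pvRank) := by
    rw [PySem.Dict.counter_eq_foldl, List.foldl_map]
  have hpred : (fun card : String => decide (2 ≤ (PySem.Dict.counter
        (cpu_hand.map pvRank)).getD (pvRank card) 0))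
      = (fun c => decide (2 ≤ (cpu_hand.map pvRank).count (pvRank c))) := by
    funext card
    rw [PySem.Dict.getD_counter, decide_eq_decide]
    exact_mod_cast Iff.rfl
  unfold cpu_discard_alt pvGoB pvScan
  simp only [hcounter, hpred]

-- ===== VERDICT (by name: the statement is the Claim_ definition above) =====
theorem cpu_discard_spec : Claim_equal_cpu_discard := by
  intro cpu next_player cpu_hand next_player_pile _
  unfold Spec_cpu_discard
  rw [portA_eq, portB_eq]
  exact main_eq cpu_hand cpu_hand [] rfl (by simp)
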